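-- pv_equiv track=rewrite | github.com/1092soobin2/Algorithm-Study | bfs,dfs/(1.5) dfs재귀__SWEA_2112_보호필름.py | min_projection_count
-- ===== SOURCE A (Python) =====
-- def test_film(film, depth, width, criteria):
--     entire_pass = True
--
--     for c in range(width):
--         same_attr = 1
--         col_pass = False
--         for r in range(1, depth):
--             if film[r][c] == film[r-1][c]:
--                 same_attr += 1
--             else:
--                 same_attr = 1
--             if same_attr >= criteria:
--                 col_pass = True
--                 break
--         if not col_pass:
--             entire_pass = False
--             break
--
--     return entire_pass
--
-- def min_projection_count(film, depth, width, criteria) -> int: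
--
--     if test_film(film, depth, width, criteria):
--         return 0
--
--     def dfs(start_i, count, max_count) -> bool:
--         if test_film(film, depth, width, criteria):
--             # print_film(film, depth, width, f"count {count} / {max_count}")
--             return True
--         if count == max_count:
--             return False
--
--         for i in range(start_i, depth):
--             curr_row = film[i]
--             # A
--             film[i] = [0]*width
--             if dfs(i+1, count+1, max_count):
--                 film[i] = curr_row
--                 return True
--             # B
--             film[i] = [1]*width
--             if dfs(i+1, count+1, max_count):
--                 film[i] = curr_row
--                 return True
--             film[i] = curr_row
--
--     for num_of_row in range(1, depth+1):
--         if dfs(0, 0, num_of_row):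
--             return num_of_row
--
--     return depth
-- ===== SOURCE B (Python) =====
-- def min_projection_count(film, depth, width, criteria):
--     def ok(paint):
--         for c in range(width):
--             col = [paint[r] if r in paint else film[r][c] for r in range(depth)]
--             run = 1
--             hit = False
--             for prev, cur in zip(col, col[1:]):
--                 run = run + 1 if cur == prev else 1
--                 if run >= criteria:
--                     hit = True
--                     break
--             if not hit:
--                 return False
--         return True
--
--     paint = {}
--     best = None
--
--     def search(i, cnt):
--         nonlocal best
--         if best is not None and cnt >= best:
--             return
--         if ok(paint):
--             best = cnt
--             return
--         if i >= depth:
--             return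
--         search(i + 1, cnt)
--         paint[i] = 0
--         search(i + 1, cnt + 1)
--         paint[i] = 1
--         search(i + 1, cnt + 1)
--         del paint[i]
--
--     search(0, 0)
--     return best if best is not None else depth
-- ===== Notes on version B (the rewrite author's own statement) =====
-- stated objective: alternative
-- what changed: A's iterative-deepening outer loop with a budgeted boolean dfs that temporarily mutates film is replaced by a single pruned branch-and-bound DFS over a separate paint overlay (keep/0/1 per row) that returns the minimum repaint count directly.
-- outside the precondition, e.g. on min_projection_count([[0], [0]], 3, 1, 1): A returns 0, B raises IndexError
import Mathlib
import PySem

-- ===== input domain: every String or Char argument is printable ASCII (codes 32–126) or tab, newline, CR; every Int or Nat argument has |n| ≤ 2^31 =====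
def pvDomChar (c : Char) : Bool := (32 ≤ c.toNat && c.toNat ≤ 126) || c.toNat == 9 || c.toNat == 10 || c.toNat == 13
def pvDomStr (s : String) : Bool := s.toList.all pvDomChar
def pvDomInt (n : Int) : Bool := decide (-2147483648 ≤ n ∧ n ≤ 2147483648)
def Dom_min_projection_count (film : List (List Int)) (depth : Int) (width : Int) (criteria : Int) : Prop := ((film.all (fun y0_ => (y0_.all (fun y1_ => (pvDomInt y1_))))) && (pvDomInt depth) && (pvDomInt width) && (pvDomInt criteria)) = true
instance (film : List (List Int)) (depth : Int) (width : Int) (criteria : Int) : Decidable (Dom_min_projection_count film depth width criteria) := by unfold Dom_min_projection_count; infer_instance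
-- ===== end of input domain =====

-- B replaces A's iterative-deepening search with in-place film mutation by a single pruned
-- branch-and-bound DFS over a separate paint overlay that returns the minimum repaint count
-- directly (objective: alternative; A's temporary mutation of `film` is restored before return,
-- so only the return value is at stake).

-- ===== PORT A =====
-- film[r][c] read (total helper; inside Pre_ every such access is in range)
def pyGet2 (film : List (List Int)) (r c : Int) : Int :=
  ((PySem.List.pyGet? ((PySem.List.pyGet? film r).getD []) c)).getD 0

-- inner `for r in range(1, depth)` loop of test_film, with early break
def colLoopA (film : List (List Int)) (c criteria : Int) (rs : List Int) (same : Int) : Bool :=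
  match rs with
  | [] => false
  | r :: rest =>
    let same' := if pyGet2 film r c = pyGet2 film (r - 1) c then same + 1 else 1
    if criteria ≤ same' then true else colLoopA film c criteria rest same'

-- test_film (outer loop with `entire_pass`/break = List.all)
def testA (film : List (List Int)) (depth width criteria : Int) : Bool :=
  (PySem.List.pyRange 0 width 1).all
    (fun c => colLoopA film c criteria (PySem.List.pyRange 1 depth 1) 1)

-- dfs / its `for i in range(start_i, depth)` loop; fuel only makes the recursion total
-- (one unit per nesting level; count==maxc is checked before fuel is consumed, and the
-- top-level call supplies more fuel than the maxc-count levels that can occur)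
mutual
def dfsA (film : List (List Int)) (depth width criteria : Int) (fuel : Nat)
    (start count maxc : Int) : Bool :=
  if testA film depth width criteria then true
  else if count = maxc then false
  else match fuel with
    | 0 => false
    | f + 1 => loopA film depth width criteria f (PySem.List.pyRange start depth 1) count maxc
  termination_by (fuel, 0)

def loopA (film : List (List Int)) (depth width criteria : Int) (fuel : Nat)
    (rs : List Int) (count maxc : Int) : Bool :=
  match rs with
  | [] => false
  | i :: rest =>
    if dfsA (film.set i.toNat (List.replicate width.toNat 0)) depth width criteria fuel
        (i + 1) (count + 1) maxc then true
    else if dfsA (film.set i.toNat (List.replicate width.toNat 1)) depth width criteria fuel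
        (i + 1) (count + 1) maxc then true
    else loopA film depth width criteria fuel rest count maxc
  termination_by (fuel, rs.length + 1)
end

-- `for num_of_row in range(1, depth+1)` of min_projection_count
def outerA (film : List (List Int)) (depth width criteria : Int) (ks : List Int) : Int :=
  match ks with
  | [] => depth
  | k :: rest =>
    if dfsA film depth width criteria (k.toNat + 1) 0 0 k then k
    else outerA film depth width criteria rest

def min_projection_count (film : List (List Int)) (depth : Int) (width : Int) (criteria : Int) : Int :=
  if testA film depth width criteria then 0
  else outerA film depth width criteria (PySem.List.pyRange 1 (depth + 1) 1)

-- ===== PORT B =====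
-- `[paint[r] if r in paint else film[r][c] for r in range(depth)]`
-- (the film[r][c] read is inlined; inside Pre_ it is always in range)
def colOfB (film : List (List Int)) (paint : PySem.Dict Int Int) (depth c : Int) : List Int :=
  (PySem.List.pyRange 0 depth 1).map (fun r =>
    match PySem.Dict.get? paint r with
    | some v => v
    | none => (PySem.List.pyGet? ((PySem.List.pyGet? film r).getD []) c).getD 0)

-- `for prev, cur in zip(col, col[1:])` run scan with early break
def hasRunAux (criteria : Int) (ps : List (Int × Int)) (run : Int) : Bool :=
  match ps with
  | [] => false
  | (prev, cur) :: rest =>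
    let run' := if cur = prev then run + 1 else 1
    if criteria ≤ run' then true else hasRunAux criteria rest run'

def hasRunB (criteria : Int) (col : List Int) : Bool :=
  hasRunAux criteria (col.zip col.tail) 1

def okB (film : List (List Int)) (depth width criteria : Int) (paint : PySem.Dict Int Int) : Bool :=
  (PySem.List.pyRange 0 width 1).all (fun c => hasRunB criteria (colOfB film paint depth c))

-- `best is not None and cnt >= best`
def pruneB (best : Option Int) (cnt : Int) : Bool :=
  match best with
  | some b => decide (b ≤ cnt)
  | none => false

-- `search(i, cnt)`: the nonlocal `best` is threaded through; paint restore is automatic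
def searchB (film : List (List Int)) (depth width criteria : Int) (paint : PySem.Dict Int Int)
    (i cnt : Int) (best : Option Int) : Option Int :=
  if pruneB best cnt then best
  else if okB film depth width criteria paint then some cnt
  else if h : depth ≤ i then best
  else
    let b1 := searchB film depth width criteria paint (i + 1) cnt best
    let b2 := searchB film depth width criteria (paint.insert i 0) (i + 1) (cnt + 1) b1
    searchB film depth width criteria (paint.insert i 1) (i + 1) (cnt + 1) b2
termination_by (depth - i).toNat
decreasing_by all_goals omega

def min_projection_count_alt (film : List (List Int)) (depth : Int) (width : Int) (criteria : Int) : Int :=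
  match searchB film depth width criteria PySem.Dict.empty 0 0 none with
  | some b => b
  | none => depth

-- ===== PRECONDITION & SPEC =====
-- Pre_ excludes films too short or too ragged for the requested depth×width window, on which
-- Python indexing can raise IndexError; on a few such inputs A still returns because an early
-- break skips the out-of-range access (see cites), and B raises there.
def Pre_min_projection_count (film : List (List Int)) (depth : Int) (width : Int) (criteria : Int) : Prop :=
  width ≤ 0 ∨ depth ≤ 0 ∨
    (depth ≤ (film.length : Int) ∧ ∀ row ∈ film.take depth.toNat, width ≤ (row.length : Int))
instance (film : List (List Int)) (depth : Int) (width : Int) (criteria : Int) : Decidable (Pre_min_projection_count film depth width criteria) := by unfold Pre_min_projection_count; infer_instance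

def pvWitness_min_projection_count : List (List Int) × Int × Int × Int := ([[0, 1], [1, 0]], 2, 2, 2)

def Spec_min_projection_count (film : List (List Int)) (depth : Int) (width : Int) (criteria : Int) (out : Int) : Prop := out = min_projection_count_alt film depth width criteria
instance (film : List (List Int)) (depth : Int) (width : Int) (criteria : Int) (out : Int) : Decidable (Spec_min_projection_count film depth width criteria out) := by unfold Spec_min_projection_count; infer_instance

-- ===== CLAIM (what is proved, stated in full; the proofs are below) =====
def Claim_equal_min_projection_count : Prop := ∀ (film : List (List Int)) (depth : Int) (width : Int) (criteria : Int), Dom_min_projection_count film depth width criteria → Pre_min_projection_count film depth width criteria → Spec_min_projection_count film depth width criteria (min_projection_count film depth width criteria)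

-- ===== LEMMAS AND PROOFS =====

-- choices over a row-index list: each element is one way to repaint a sub-multiset of those
-- rows (row, colour 0/1), in index order; it enumerates exactly the repaint options both
-- searches range over.
def choices : List Int → List (List (Int × Int))
  | [] => [[]]
  | i :: rest =>
    choices rest ++ (choices rest).map (fun cs => (i, 0) :: cs)
      ++ (choices rest).map (fun cs => (i, 1) :: cs)

-- A's view of a repaint option: rows overwritten by constant rows in film itself
def applySet (width : Int) (film : List (List Int)) (cs : List (Int × Int)) : List (List Int) :=
  cs.foldl (fun f p => f.set p.1.toNat (List.replicate width.toNat p.2)) film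

-- B's view of the same option: entries of the paint overlay inserted
def paintApply (paint : PySem.Dict Int Int) (cs : List (Int × Int)) : PySem.Dict Int Int :=
  cs.foldl (fun q p => q.insert p.1 p.2) paint

def optMin : Option Int → Option Int → Option Int
  | none, y => y
  | some b, none => some b
  | some b, some m => some (min b m)

def listMin (l : List Int) : Option Int := l.foldl (fun acc x => optMin acc (some x)) none

-- candidate values seen by A's search from row s on
def wlistA (film : List (List Int)) (d w cr s : Int) : List Int :=
  ((choices (PySem.List.pyRange s d 1)).filter
    (fun cs => testA (applySet w film cs) d w cr)).map (fun cs => (cs.length : Int))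

-- candidate values seen by B's search from row i on, at running count cnt
def wlistB (film : List (List Int)) (d w cr : Int) (paint : PySem.Dict Int Int) (i cnt : Int) : List Int :=
  ((choices (PySem.List.pyRange i d 1)).filter
    (fun cs => okB film d w cr (paintApply paint cs))).map (fun cs => cnt + (cs.length : Int))

lemma optMin_none_right (x : Option Int) : optMin x none = x := by cases x <;> rfl

lemma optMin_assoc (x y z : Option Int) : optMin (optMin x y) z = optMin x (optMin y z) := by
  cases x <;> cases y <;> cases z <;> simp [optMin, min_assoc]

lemma foldl_optMin (l : List Int) : ∀ acc : Option Int,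
    l.foldl (fun a x => optMin a (some x)) acc = optMin acc (listMin l) := by
  induction l with
  | nil => intro acc; simp [listMin, optMin_none_right]
  | cons x t ih =>
    intro acc
    simp only [listMin, List.foldl_cons]
    rw [ih, ih (optMin none (some x))]
    cases acc <;> cases listMin t <;> simp [optMin, min_assoc]

lemma listMin_cons (x : Int) (t : List Int) : listMin (x :: t) = optMin (some x) (listMin t) := by
  simp only [listMin, List.foldl_cons]
  rw [foldl_optMin]
  rfl

lemma listMin_append (l₁ l₂ : List Int) :
    listMin (l₁ ++ l₂) = optMin (listMin l₁) (listMin l₂) := by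
  simp only [listMin, List.foldl_append]
  rw [foldl_optMin]
  rfl

lemma listMin_eq_none_iff (l : List Int) : listMin l = none ↔ l = [] := by
  cases l with
  | nil => simp [listMin]
  | cons x t => rw [listMin_cons]; cases listMin t <;> simp [optMin]

lemma listMin_spec (l : List Int) (m : Int) (h : listMin l = some m) :
    m ∈ l ∧ ∀ x ∈ l, m ≤ x := by
  induction l generalizing m with
  | nil => simp [listMin] at h
  | cons x t ih =>
    rw [listMin_cons] at h
    cases ht : listMin t with
    | none =>
      rw [ht] at h
      simp [optMin] at h
      subst h
      have : t = [] := (listMin_eq_none_iff t).mp ht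
      simp [this]
    | some mt =>
      rw [ht] at h
      simp [optMin] at h
      obtain ⟨hmem, hle⟩ := ih mt ht
      constructor
      · rcases le_total x mt with hc | hc
        · simp [← h, min_eq_left hc]
        · right; rw [← h, min_eq_right hc]; exact hmem
      · intro y hy
        rcases List.mem_cons.mp hy with rfl | hyt
        · rw [← h]; exact min_le_left _ _
        · rw [← h]; exact le_trans (min_le_right _ _) (hle y hyt)

lemma nil_mem_choices (rs : List Int) : [] ∈ choices rs := by
  induction rs with
  | nil => simp [choices]
  | cons i t ih => simp [choices]; tauto

lemma mem_choices_cons {cs : List (Int × Int)} {i : Int} {rest : List Int} :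
    cs ∈ choices (i :: rest) ↔
      cs ∈ choices rest ∨ (∃ cs' ∈ choices rest, cs = (i, 0) :: cs') ∨
        (∃ cs' ∈ choices rest, cs = (i, 1) :: cs') := by
  simp [choices, eq_comm]

lemma choices_fst_sublist {cs : List (Int × Int)} {rs : List Int} (h : cs ∈ choices rs) :
    List.Sublist (cs.map Prod.fst) rs := by
  induction rs generalizing cs with
  | nil => simp [choices] at h; simp [h]
  | cons i t ih =>
    rcases mem_choices_cons.mp h with h1 | ⟨cs', hcs', rfl⟩ | ⟨cs', hcs', rfl⟩
    · exact (ih h1).cons i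
    · simpa using (ih hcs').cons₂ i
    · simpa using (ih hcs').cons₂ i

lemma choices_length_le {cs : List (Int × Int)} {rs : List Int} (h : cs ∈ choices rs) :
    cs.length ≤ rs.length := by
  have := (choices_fst_sublist h).length_le
  simpa using this

-- overlay lookups
lemma get?_paintApply_not (cs : List (Int × Int)) (r : Int)
    (h : ∀ v, (r, v) ∉ cs) :
    ∀ paint : PySem.Dict Int Int, PySem.Dict.get? (paintApply paint cs) r = PySem.Dict.get? paint r := by
  induction cs with
  | nil => intro paint; rfl
  | cons q t ih =>
    intro paint
    obtain ⟨j, u⟩ := q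
    have hne : r ≠ j := by
      rintro rfl
      exact h u (by simp)
    show PySem.Dict.get? (paintApply (paint.insert j u) t) r = _
    rw [ih (fun v hv => h v (by simp [hv]))]
    exact PySem.Dict.get?_insert_of_ne _ _ hne

lemma get?_paintApply_mem (cs : List (Int × Int)) (r v : Int)
    (hmem : (r, v) ∈ cs) (hnd : (cs.map Prod.fst).Nodup) :
    ∀ paint : PySem.Dict Int Int, PySem.Dict.get? (paintApply paint cs) r = some v := by
  induction cs with
  | nil => simp at hmem
  | cons q t ih =>
    intro paint
    obtain ⟨j, u⟩ := q
    simp only [List.map_cons, List.nodup_cons] at hnd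
    rcases List.mem_cons.mp hmem with heq | hmemt
    · obtain ⟨rfl, rfl⟩ : r = j ∧ v = u := by simpa [Prod.ext_iff] using heq
      show PySem.Dict.get? (paintApply (paint.insert r v) t) r = some v
      have hnot : ∀ v', (r, v') ∉ t := by
        intro v' hv'
        exact hnd.1 (by simpa using List.mem_map_of_mem (f := Prod.fst) hv')
      rw [get?_paintApply_not t r hnot]
      rw [PySem.Dict.get?_insert_self]
    · show PySem.Dict.get? (paintApply (paint.insert j u) t) r = some v
      exact ih hmemt hnd.2 _

lemma applySet_getElem?_not (w : Int) (cs : List (Int × Int)) (r : Int) (hr : 0 ≤ r)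
    (h : ∀ v, (r, v) ∉ cs) (hb : ∀ q ∈ cs, 0 ≤ q.1) :
    ∀ film : List (List Int), (applySet w film cs)[r.toNat]? = film[r.toNat]? := by
  induction cs with
  | nil => intro film; rfl
  | cons q t ih =>
    intro film
    obtain ⟨j, u⟩ := q
    have hne : j ≠ r := by
      rintro rfl
      exact h u (by simp)
    simp only [applySet, List.foldl_cons] at ih ⊢
    rw [ih (fun v hv => h v (by simp [hv])) (fun q hq => hb q (by simp [hq]))]
    exact List.getElem?_set_ne (by have := hb (j, u) (by simp); omega)

lemma applySet_getElem?_mem (w : Int) (cs : List (Int × Int)) (r v : Int)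
    (hmem : (r, v) ∈ cs) (hnd : (cs.map Prod.fst).Nodup) :
    ∀ film : List (List Int), (∀ q ∈ cs, 0 ≤ q.1 ∧ q.1.toNat < film.length) →
      (applySet w film cs)[r.toNat]? = some (List.replicate w.toNat v) := by
  induction cs with
  | nil => simp at hmem
  | cons q t ih =>
    intro film hb
    obtain ⟨j, u⟩ := q
    simp only [List.map_cons, List.nodup_cons] at hnd
    rcases List.mem_cons.mp hmem with heq | hmemt
    · obtain ⟨rfl, rfl⟩ : r = j ∧ v = u := by simpa [Prod.ext_iff] using heq
      show (applySet w (film.set r.toNat (List.replicate w.toNat v)) t)[r.toNat]? = some (List.replicate w.toNat v)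
      have hnot : ∀ v', (r, v') ∉ t := by
        intro v' hv'
        exact hnd.1 (by simpa using List.mem_map_of_mem (f := Prod.fst) hv')
      rw [applySet_getElem?_not w t r (hb (r, v) (by simp)).1 hnot
            (fun q hq => (hb q (by simp [hq])).1)]
      exact List.getElem?_set_self ((by simpa using (hb (r, v) (by simp)).2))
    · show (applySet w (film.set j.toNat (List.replicate w.toNat u)) t)[r.toNat]? = some (List.replicate w.toNat v)
      exact ih hmemt hnd.2 _ (fun q hq => by
        have := hb q (by simp [hq])
        simpa using this)

lemma applySet_cons (w : Int) (film : List (List Int)) (i x : Int) (cs : List (Int × Int)) :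
    applySet w film ((i, x) :: cs) = applySet w (film.set i.toNat (List.replicate w.toNat x)) cs := rfl

lemma paintApply_cons (p : PySem.Dict Int Int) (i x : Int) (cs : List (Int × Int)) :
    paintApply p ((i, x) :: cs) = paintApply (p.insert i x) cs := rfl

-- characterization of A's inner loop: it finds exactly the nonempty repaint options within budget
lemma loop_char_of_dfs (d w cr : Int) (fuel : Nat)
    (hdfs : ∀ (film : List (List Int)) (s count maxc : Int), count ≤ maxc →
      (maxc - count).toNat ≤ fuel →
      (dfsA film d w cr fuel s count maxc = true ↔
        ∃ cs ∈ choices (PySem.List.pyRange s d 1), count + (cs.length : Int) ≤ maxc ∧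
          testA (applySet w film cs) d w cr = true)) :
    ∀ (n : Nat) (film : List (List Int)) (s count maxc : Int), (d - s).toNat = n →
      count < maxc → (maxc - (count + 1)).toNat ≤ fuel →
      (loopA film d w cr fuel (PySem.List.pyRange s d 1) count maxc = true ↔
        ∃ cs ∈ choices (PySem.List.pyRange s d 1), cs ≠ [] ∧ count + (cs.length : Int) ≤ maxc ∧
          testA (applySet w film cs) d w cr = true) := by
  intro n
  induction n using Nat.strong_induction_on with
  | _ n ih =>
    intro film s count maxc hn hlt hf
    by_cases hsd : s < d
    · rw [PySem.List.pyRange_one_cons hsd]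
      have h0 := hdfs (film.set s.toNat (List.replicate w.toNat 0)) (s + 1) (count + 1) maxc
        (by omega) (by omega)
      have h1 := hdfs (film.set s.toNat (List.replicate w.toNat 1)) (s + 1) (count + 1) maxc
        (by omega) (by omega)
      have hmlt : (d - (s + 1)).toNat < n := by clear h0 h1 hdfs ih; omega
      have h2 := ih (d - (s + 1)).toNat hmlt film (s + 1) count maxc rfl hlt hf
      constructor
      · intro hL
        by_cases hb0 : dfsA (film.set s.toNat (List.replicate w.toNat 0)) d w cr fuel
            (s + 1) (count + 1) maxc = true
        · obtain ⟨cs', hcs', hlen, htest⟩ := h0.mp hb0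
          refine ⟨(s, 0) :: cs', mem_choices_cons.mpr (Or.inr (Or.inl ⟨cs', hcs', rfl⟩)),
            by simp, ?_, ?_⟩
          · simp only [List.length_cons]; push_cast; omega
          · rw [applySet_cons]; exact htest
        · by_cases hb1 : dfsA (film.set s.toNat (List.replicate w.toNat 1)) d w cr fuel
              (s + 1) (count + 1) maxc = true
          · obtain ⟨cs', hcs', hlen, htest⟩ := h1.mp hb1
            refine ⟨(s, 1) :: cs', mem_choices_cons.mpr (Or.inr (Or.inr ⟨cs', hcs', rfl⟩)),
              by simp, ?_, ?_⟩
            · simp only [List.length_cons]; push_cast; omega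
            · rw [applySet_cons]; exact htest
          · have hrest : loopA film d w cr fuel (PySem.List.pyRange (s + 1) d 1) count maxc = true := by
              rw [loopA] at hL
              rw [if_neg hb0, if_neg hb1] at hL
              exact hL
            obtain ⟨cs, hcs, hne, hlen, htest⟩ := h2.mp hrest
            exact ⟨cs, mem_choices_cons.mpr (Or.inl hcs), hne, hlen, htest⟩
      · rintro ⟨cs, hcs, hne, hlen, htest⟩
        rw [loopA]
        rcases mem_choices_cons.mp hcs with hA | ⟨cs', hcs', rfl⟩ | ⟨cs', hcs', rfl⟩
        · have hrest : loopA film d w cr fuel (PySem.List.pyRange (s + 1) d 1) count maxc = true :=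
            h2.mpr ⟨cs, hA, hne, hlen, htest⟩
          split_ifs <;> first | rfl | exact hrest
        · have hb0 : dfsA (film.set s.toNat (List.replicate w.toNat 0)) d w cr fuel
              (s + 1) (count + 1) maxc = true := by
            refine h0.mpr ⟨cs', hcs', ?_, ?_⟩
            · simp only [List.length_cons] at hlen; push_cast at hlen ⊢; omega
            · rw [← applySet_cons]; exact htest
          split_ifs with hc0 hc1 <;> first | rfl | exact absurd hb0 hc0
        · have hb1 : dfsA (film.set s.toNat (List.replicate w.toNat 1)) d w cr fuel
              (s + 1) (count + 1) maxc = true := by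
            refine h1.mpr ⟨cs', hcs', ?_, ?_⟩
            · simp only [List.length_cons] at hlen; push_cast at hlen ⊢; omega
            · rw [← applySet_cons]; exact htest
          split_ifs with hc0 hc1 <;> first | rfl | exact absurd hb1 hc1
    · rw [PySem.List.pyRange_one_eq_nil (by omega)]
      rw [loopA]
      simp [choices]

-- characterization of A's dfs: it succeeds exactly when some repaint option within budget passes
lemma dfs_char (d w cr : Int) : ∀ (fuel : Nat) (film : List (List Int)) (s count maxc : Int),
    count ≤ maxc → (maxc - count).toNat ≤ fuel →
    (dfsA film d w cr fuel s count maxc = true ↔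
      ∃ cs ∈ choices (PySem.List.pyRange s d 1), count + (cs.length : Int) ≤ maxc ∧
        testA (applySet w film cs) d w cr = true) := by
  intro fuel
  induction fuel with
  | zero =>
    intro film s count maxc hle hf
    have hcm : count = maxc := by omega
    rw [dfsA]
    by_cases ht : testA film d w cr = true
    · rw [if_pos ht]
      exact ⟨fun _ => ⟨[], nil_mem_choices _, by simpa using hle, by simpa [applySet] using ht⟩,
        fun _ => rfl⟩
    · rw [if_neg ht, if_pos hcm]
      constructor
      · intro h; exact nomatch h
      · rintro ⟨cs, hcs, hlen, htest⟩
        exfalso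
        have hcs0 : cs = [] := List.eq_nil_iff_length_eq_zero.mpr (by omega)
        subst hcs0
        exact ht (by simpa [applySet] using htest)
  | succ f ihf =>
    intro film s count maxc hle hf
    rw [dfsA]
    by_cases ht : testA film d w cr = true
    · rw [if_pos ht]
      exact ⟨fun _ => ⟨[], nil_mem_choices _, by simpa using hle, by simpa [applySet] using ht⟩,
        fun _ => rfl⟩
    · by_cases hcm : count = maxc
      · rw [if_neg ht, if_pos hcm]
        constructor
        · intro h; exact nomatch h
        · rintro ⟨cs, hcs, hlen, htest⟩
          exfalso
          have hcs0 : cs = [] := List.eq_nil_iff_length_eq_zero.mpr (by omega)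
          subst hcs0
          exact ht (by simpa [applySet] using htest)
      · have hlt : count < maxc := lt_of_le_of_ne hle hcm
        rw [if_neg ht, if_neg hcm]
        rw [loop_char_of_dfs d w cr f ihf (d - s).toNat film s count maxc rfl hlt (by omega)]
        constructor
        · rintro ⟨cs, h1, _, h3, h4⟩; exact ⟨cs, h1, h3, h4⟩
        · rintro ⟨cs, h1, h3, h4⟩
          refine ⟨cs, h1, ?_, h3, h4⟩
          rintro rfl
          exact ht (by simpa [applySet] using h4)
lemma mem_wlistA {film : List (List Int)} {d w cr s x : Int} :
    x ∈ wlistA film d w cr s ↔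
      ∃ cs ∈ choices (PySem.List.pyRange s d 1),
        testA (applySet w film cs) d w cr = true ∧ x = (cs.length : Int) := by
  simp only [wlistA, List.mem_map, List.mem_filter]
  constructor
  · rintro ⟨cs, ⟨h1, h2⟩, rfl⟩; exact ⟨cs, h1, h2, rfl⟩
  · rintro ⟨cs, h1, h2, rfl⟩; exact ⟨cs, ⟨h1, h2⟩, rfl⟩

lemma dfsA_top_iff (film : List (List Int)) (d w cr k : Int) (hk : 0 ≤ k) :
    (dfsA film d w cr (k.toNat + 1) 0 0 k = true ↔
      ∃ cs ∈ choices (PySem.List.pyRange 0 d 1), (cs.length : Int) ≤ k ∧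
        testA (applySet w film cs) d w cr = true) := by
  have h := dfs_char d w cr (k.toNat + 1) film 0 0 k hk (by omega)
  simpa using h

lemma outer_none (film : List (List Int)) (d w cr : Int)
    (hnone : ∀ cs ∈ choices (PySem.List.pyRange 0 d 1),
      ¬ testA (applySet w film cs) d w cr = true) :
    ∀ ks : List Int, (∀ k ∈ ks, 0 ≤ k) → outerA film d w cr ks = d := by
  intro ks
  induction ks with
  | nil => intro _; rfl
  | cons k t ih =>
    intro hks
    rw [outerA]
    have hfalse : ¬ dfsA film d w cr (k.toNat + 1) 0 0 k = true := by
      intro htrue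
      obtain ⟨cs, hcs, _, hpass⟩ := (dfsA_top_iff film d w cr k (hks k (by simp))).mp htrue
      exact hnone cs hcs hpass
    rw [if_neg hfalse]
    exact ih (fun k hk => hks k (by simp [hk]))

lemma outer_found (film : List (List Int)) (d w cr m : Int)
    (hLM : listMin (wlistA film d w cr 0) = some m) (hd : 0 < d) (hm1 : 1 ≤ m) :
    ∀ (nn : Nat) (a : Int), (m - a).toNat = nn → 1 ≤ a → a ≤ m →
      outerA film d w cr (PySem.List.pyRange a (d + 1) 1) = m := by
  obtain ⟨hmem, hle⟩ := listMin_spec _ _ hLM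
  obtain ⟨csm, hcsm, hpassm, hmlen⟩ := mem_wlistA.mp hmem
  have hmd : m ≤ d := by
    have h1 := choices_length_le hcsm
    have h2 : (PySem.List.pyRange 0 d 1).length = (d - 0).toNat := PySem.List.length_pyRange_one ..
    have : (csm.length : Int) ≤ ((d - 0).toNat : Int) := by exact_mod_cast h2 ▸ Int.ofNat_le.mpr h1
    omega
  intro nn
  induction nn using Nat.strong_induction_on with
  | _ nn ih =>
    intro a hnn ha1 ham
    have had : a < d + 1 := by omega
    rw [PySem.List.pyRange_one_cons had]
    rw [outerA]
    by_cases hcase : m ≤ a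
    · have haem : a = m := le_antisymm ham hcase
      have htrue : dfsA film d w cr (a.toNat + 1) 0 0 a = true :=
        (dfsA_top_iff film d w cr a (by omega)).mpr ⟨csm, hcsm, by omega, hpassm⟩
      rw [if_pos htrue]
      exact haem
    · have hfalse : ¬ dfsA film d w cr (a.toNat + 1) 0 0 a = true := by
        intro htrue
        obtain ⟨cs, hcs, hlen, hpass⟩ := (dfsA_top_iff film d w cr a (by omega)).mp htrue
        have : m ≤ (cs.length : Int) := hle _ (mem_wlistA.mpr ⟨cs, hcs, hpass, rfl⟩)
        omega
      rw [if_neg hfalse]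
      exact ih (m - (a + 1)).toNat (by omega) (a + 1) rfl (by omega) (by omega)

-- A's result is the least repaint weight, d if none exists
lemma A_main (film : List (List Int)) (d w cr : Int) (hd : 0 < d) :
    min_projection_count film d w cr =
      (match listMin (wlistA film d w cr 0) with | some m => m | none => d) := by
  cases hLM : listMin (wlistA film d w cr 0) with
  | none =>
    have hnil : wlistA film d w cr 0 = [] := (listMin_eq_none_iff _).mp hLM
    have hnone : ∀ cs ∈ choices (PySem.List.pyRange 0 d 1),
        ¬ testA (applySet w film cs) d w cr = true := by
      intro cs hcs hpass
      have : ((cs.length : Int)) ∈ wlistA film d w cr 0 := mem_wlistA.mpr ⟨cs, hcs, hpass, rfl⟩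
      simp [hnil] at this
    have ht : ¬ testA film d w cr = true := by
      have := hnone [] (nil_mem_choices _)
      simpa [applySet] using this
    rw [min_projection_count, if_neg ht]
    exact outer_none film d w cr hnone _ (fun k hk => by
      have := (PySem.List.mem_pyRange_one).mp hk
      omega)
  | some m =>
    obtain ⟨hmem, hle⟩ := listMin_spec _ _ hLM
    obtain ⟨csm, hcsm, hpassm, hmlen⟩ := mem_wlistA.mp hmem
    by_cases ht : testA film d w cr = true
    · have h0 : (0 : Int) ∈ wlistA film d w cr 0 :=
        mem_wlistA.mpr ⟨[], nil_mem_choices _, by simpa [applySet] using ht, by simp⟩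
      have hm0 : m = 0 := by
        have := hle 0 h0
        omega
      rw [min_projection_count, if_pos ht]
      show (0 : Int) = m
      omega
    · have hm1 : 1 ≤ m := by
        rcases (by omega : m = 0 ∨ 1 ≤ m) with hm0 | hm1
        · exfalso
          have : csm = [] := List.eq_nil_iff_length_eq_zero.mpr (by omega)
          subst this
          exact ht (by simpa [applySet] using hpassm)
        · exact hm1
      rw [min_projection_count, if_neg ht]
      exact outer_found film d w cr m hLM hd hm1 (m - 1).toNat 1 rfl le_rfl hm1

lemma listMin_eq_some (l : List Int) (m : Int) (hm : m ∈ l) (hle : ∀ x ∈ l, m ≤ x) :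
    listMin l = some m := by
  cases h : listMin l with
  | none =>
    rw [(listMin_eq_none_iff l).mp h] at hm
    simp at hm
  | some k =>
    obtain ⟨hkmem, hkle⟩ := listMin_spec l k h
    have := le_antisymm (hle k hkmem) (hkle m hm)
    rw [this]

lemma listMin_eq_of_mem_iff (l₁ l₂ : List Int) (h : ∀ x, x ∈ l₁ ↔ x ∈ l₂) :
    listMin l₁ = listMin l₂ := by
  cases h2 : listMin l₂ with
  | none =>
    rw [listMin_eq_none_iff] at h2 ⊢
    subst h2
    cases l₁ with
    | nil => rfl
    | cons a t => exact absurd ((h a).mp (by simp)) (by simp)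
  | some m =>
    obtain ⟨hmem, hle⟩ := listMin_spec l₂ m h2
    exact listMin_eq_some l₁ m ((h m).mpr hmem) (fun x hx => hle x ((h x).mp hx))

lemma mem_wlistB {film : List (List Int)} {d w cr : Int} {paint : PySem.Dict Int Int} {i cnt x : Int} :
    x ∈ wlistB film d w cr paint i cnt ↔
      ∃ cs ∈ choices (PySem.List.pyRange i d 1),
        okB film d w cr (paintApply paint cs) = true ∧ x = cnt + (cs.length : Int) := by
  simp only [wlistB, List.mem_map, List.mem_filter]
  constructor
  · rintro ⟨cs, ⟨h1, h2⟩, rfl⟩; exact ⟨cs, h1, h2, rfl⟩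
  · rintro ⟨cs, h1, h2, rfl⟩; exact ⟨cs, ⟨h1, h2⟩, rfl⟩

lemma wlistB_ge {film : List (List Int)} {d w cr : Int} {paint : PySem.Dict Int Int} {i cnt x : Int}
    (h : x ∈ wlistB film d w cr paint i cnt) : cnt ≤ x := by
  obtain ⟨cs, _, _, rfl⟩ := mem_wlistB.mp h
  have : (0 : Int) ≤ (cs.length : Int) := by positivity
  omega

lemma pruneB_iff {best : Option Int} {cnt : Int} :
    pruneB best cnt = true ↔ ∃ b, best = some b ∧ b ≤ cnt := by
  cases best <;> simp [pruneB]

-- characterization of B's search: it returns the min of `best` and all completions' counts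
lemma search_char (film : List (List Int)) (d w cr : Int) :
    ∀ (n : Nat) (paint : PySem.Dict Int Int) (i cnt : Int) (best : Option Int),
      (d - i).toNat = n →
      searchB film d w cr paint i cnt best =
        optMin best (listMin (wlistB film d w cr paint i cnt)) := by
  intro n
  induction n using Nat.strong_induction_on with
  | _ n ih =>
    intro paint i cnt best hn
    rw [searchB]
    by_cases hp : pruneB best cnt = true
    · rw [if_pos hp]
      obtain ⟨b, rfl, hb⟩ := pruneB_iff.mp hp
      cases hLM : listMin (wlistB film d w cr paint i cnt) with
      | none => rfl
      | some m =>
        obtain ⟨hmem, _⟩ := listMin_spec _ _ hLM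
        have hcm : cnt ≤ m := wlistB_ge hmem
        simp [optMin, min_eq_left (by omega : b ≤ m)]
    · rw [if_neg hp]
      by_cases hok : okB film d w cr paint = true
      · rw [if_pos hok]
        have hmem : cnt ∈ wlistB film d w cr paint i cnt :=
          mem_wlistB.mpr ⟨[], nil_mem_choices _, by simpa [paintApply] using hok, by simp⟩
        rw [listMin_eq_some _ _ hmem (fun x hx => wlistB_ge hx)]
        cases best with
        | none => rfl
        | some b =>
          have hb : cnt < b := by
            rcases (by omega : cnt < b ∨ b ≤ cnt) with h | h
            · exact h
            · exact absurd (pruneB_iff.mpr ⟨b, rfl, h⟩) hp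
          simp [optMin, min_eq_right (by omega : cnt ≤ b)]
      · rw [if_neg hok]
        by_cases hid : d ≤ i
        · rw [dif_pos hid]
          have hempty : wlistB film d w cr paint i cnt = [] := by
            unfold wlistB
            rw [PySem.List.pyRange_one_eq_nil hid]
            simp [choices, paintApply, hok]
          rw [hempty]
          have : listMin ([] : List Int) = none := rfl
          rw [this, optMin_none_right]
        · rw [dif_neg hid]
          have hi : i < d := by omega
          show searchB film d w cr (paint.insert i 1) (i + 1) (cnt + 1)
              (searchB film d w cr (paint.insert i 0) (i + 1) (cnt + 1)
                (searchB film d w cr paint (i + 1) cnt best)) = _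
          have hmlt : (d - (i + 1)).toNat < n := by clear ih; omega
          rw [ih _ hmlt paint (i + 1) cnt best rfl,
            ih _ hmlt (paint.insert i 0) (i + 1) (cnt + 1) _ rfl,
            ih _ hmlt (paint.insert i 1) (i + 1) (cnt + 1) _ rfl]
          rw [optMin_assoc, optMin_assoc]
          congr 1
          rw [← listMin_append, ← listMin_append]
          apply listMin_eq_of_mem_iff
          intro x
          rw [List.mem_append, List.mem_append]
          constructor
          · intro hx
            rcases hx with hx | hx | hx
            · obtain ⟨cs, hcs, hokx, rfl⟩ := mem_wlistB.mp hx
              refine mem_wlistB.mpr ⟨cs, ?_, hokx, rfl⟩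
              rw [PySem.List.pyRange_one_cons hi]
              exact mem_choices_cons.mpr (Or.inl hcs)
            · obtain ⟨cs', hcs', hokx, rfl⟩ := mem_wlistB.mp hx
              refine mem_wlistB.mpr ⟨(i, 0) :: cs', ?_, ?_, ?_⟩
              · rw [PySem.List.pyRange_one_cons hi]
                exact mem_choices_cons.mpr (Or.inr (Or.inl ⟨cs', hcs', rfl⟩))
              · rw [paintApply_cons]; exact hokx
              · simp only [List.length_cons]; push_cast; ring
            · obtain ⟨cs', hcs', hokx, rfl⟩ := mem_wlistB.mp hx
              refine mem_wlistB.mpr ⟨(i, 1) :: cs', ?_, ?_, ?_⟩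
              · rw [PySem.List.pyRange_one_cons hi]
                exact mem_choices_cons.mpr (Or.inr (Or.inr ⟨cs', hcs', rfl⟩))
              · rw [paintApply_cons]; exact hokx
              · simp only [List.length_cons]; push_cast; ring
          · intro hx
            obtain ⟨cs, hcs, hokx, rfl⟩ := mem_wlistB.mp hx
            rw [PySem.List.pyRange_one_cons hi] at hcs
            rcases mem_choices_cons.mp hcs with hA | ⟨cs', hcs', rfl⟩ | ⟨cs', hcs', rfl⟩
            · exact Or.inl (mem_wlistB.mpr ⟨cs, hA, hokx, rfl⟩)
            · refine Or.inr (Or.inl (mem_wlistB.mpr ⟨cs', hcs', ?_, ?_⟩))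
              · rw [← paintApply_cons]; exact hokx
              · simp only [List.length_cons]; push_cast; ring
            · refine Or.inr (Or.inr (mem_wlistB.mpr ⟨cs', hcs', ?_, ?_⟩))
              · rw [← paintApply_cons]; exact hokx
              · simp only [List.length_cons]; push_cast; ring

-- B's result is the least repaint weight, d if none exists
lemma B_main (film : List (List Int)) (d w cr : Int) :
    min_projection_count_alt film d w cr =
      (match listMin (wlistB film d w cr PySem.Dict.empty 0 0) with
        | some b => b | none => d) := by
  unfold min_projection_count_alt
  rw [search_char film d w cr (d - 0).toNat _ 0 0 none rfl]
  cases listMin (wlistB film d w cr PySem.Dict.empty 0 0) <;> rfl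

lemma all_congr_mem {l : List Int} {p q : Int → Bool} (h : ∀ x ∈ l, p x = q x) :
    l.all p = l.all q := by
  induction l with
  | nil => rfl
  | cons a t ih =>
    simp only [List.all_cons]
    rw [h a (by simp), ih (fun x hx => h x (by simp [hx]))]

-- A's run scan over film columns equals B's run scan over the zipped column list
lemma scan_eq (film' : List (List Int)) (c cr d : Int) :
    ∀ (n : Nat) (s same : Int), 0 ≤ s → (d - (s + 1)).toNat = n →
      colLoopA film' c cr (PySem.List.pyRange (s + 1) d 1) same =
        hasRunAux cr
          (((PySem.List.pyRange s d 1).map (fun r => pyGet2 film' r c)).zip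
            ((PySem.List.pyRange (s + 1) d 1).map (fun r => pyGet2 film' r c))) same := by
  intro n
  induction n using Nat.strong_induction_on with
  | _ n ih =>
    intro s same hs hn
    by_cases h : s + 1 < d
    · have e1 : PySem.List.pyRange s d 1 = s :: PySem.List.pyRange (s + 1) d 1 :=
        PySem.List.pyRange_one_cons (by omega)
      have e2 : PySem.List.pyRange (s + 1) d 1 = (s + 1) :: PySem.List.pyRange (s + 1 + 1) d 1 :=
        PySem.List.pyRange_one_cons h
      rw [e1, e2]
      simp only [List.map_cons, List.zip_cons_cons]
      simp only [colLoopA, hasRunAux]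
      rw [show s + 1 - 1 = s from by omega]
      generalize (if pyGet2 film' (s + 1) c = pyGet2 film' s c then same + 1 else (1 : Int)) = same'
      by_cases hcr : cr ≤ same'
      · rw [if_pos hcr, if_pos hcr]
      · rw [if_neg hcr, if_neg hcr]
        have := ih (d - (s + 1 + 1)).toNat (by omega) (s + 1) same' (by omega) rfl
        rw [e2] at this
        simp only [List.map_cons] at this
        rw [this]
    · have e2 : PySem.List.pyRange (s + 1) d 1 = [] := PySem.List.pyRange_one_eq_nil (by omega)
      rw [e2]
      rw [colLoopA]
      simp [hasRunAux]

-- per repaint option, B's overlay test agrees with A's test on the overwritten film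
lemma bridge (film : List (List Int)) (d w cr : Int) (hd : 0 < d)
    (hlen : d ≤ (film.length : Int)) (cs : List (Int × Int))
    (hcs : cs ∈ choices (PySem.List.pyRange 0 d 1)) :
    okB film d w cr (paintApply PySem.Dict.empty cs) =
      testA (applySet w film cs) d w cr := by
  have hsub := choices_fst_sublist hcs
  have hnd : (cs.map Prod.fst).Nodup := hsub.nodup (PySem.List.nodup_pyRange_one ..)
  have hbnd : ∀ q ∈ cs, 0 ≤ q.1 ∧ q.1 < d := by
    intro q hq
    have hmem : q.1 ∈ PySem.List.pyRange 0 d 1 :=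
      hsub.mem (List.mem_map_of_mem hq)
    have := PySem.List.mem_pyRange_one.mp hmem
    omega
  unfold okB testA
  apply all_congr_mem
  intro c hc
  have hc' := PySem.List.mem_pyRange_one.mp hc
  have hcol : colOfB film (paintApply PySem.Dict.empty cs) d c =
      (PySem.List.pyRange 0 d 1).map (fun r => pyGet2 (applySet w film cs) r c) := by
    unfold colOfB
    apply List.map_congr_left
    intro r hr
    have hr' := PySem.List.mem_pyRange_one.mp hr
    by_cases hex : ∃ v, (r, v) ∈ cs
    · obtain ⟨v, hv⟩ := hex
      have hget : PySem.Dict.get? (paintApply PySem.Dict.empty cs) r = some v :=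
        get?_paintApply_mem cs r v hv hnd _
      rw [hget]
      have hgetf : (applySet w film cs)[r.toNat]? = some (List.replicate w.toNat v) :=
        applySet_getElem?_mem w cs r v hv hnd film (fun q hq => by
          have := hbnd q hq
          constructor
          · exact this.1
          · omega)
      show v = pyGet2 (applySet w film cs) r c
      unfold pyGet2
      have hpg2 : PySem.List.pyGet? (applySet w film cs) r = (applySet w film cs)[r.toNat]? :=
        PySem.List.pyGet?_of_nonneg _ (by omega)
      rw [hpg2, hgetf]
      have hpg3 : PySem.List.pyGet? (List.replicate w.toNat v) c = some v := by
        have := PySem.List.pyGet?_of_nonneg (List.replicate w.toNat v) (i := c)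
          (by omega : (0:Int) ≤ c)
        rw [this]
        exact List.getElem?_replicate_of_lt (by omega)
      simp [hpg3]
    · push_neg at hex
      have hget : PySem.Dict.get? (paintApply PySem.Dict.empty cs) r = none := by
        rw [get?_paintApply_not cs r hex]
        rfl
      rw [hget]
      have hgetf : (applySet w film cs)[r.toNat]? = film[r.toNat]? :=
        applySet_getElem?_not w cs r (by omega) hex (fun q hq => (hbnd q hq).1) film
      show (PySem.List.pyGet? ((PySem.List.pyGet? film r).getD []) c).getD 0 =
        pyGet2 (applySet w film cs) r c
      unfold pyGet2
      have hpg2 : PySem.List.pyGet? (applySet w film cs) r = (applySet w film cs)[r.toNat]? :=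
        PySem.List.pyGet?_of_nonneg _ (by omega)
      have hpg3 : PySem.List.pyGet? film r = film[r.toNat]? :=
        PySem.List.pyGet?_of_nonneg _ (by omega)
      rw [hpg2, hpg3, hgetf]
  rw [hcol]
  unfold hasRunB
  have e0 : PySem.List.pyRange 0 d 1 = 0 :: PySem.List.pyRange (0 + 1) d 1 :=
    PySem.List.pyRange_one_cons (by omega)
  have hscan := (scan_eq (applySet w film cs) c cr d (d - (0 + 1)).toNat 0 1 le_rfl rfl).symm
  rw [e0, List.map_cons, List.tail_cons]
  rw [e0, List.map_cons] at hscan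
  simpa using hscan

-- the two candidate lists coincide at the top level
lemma lists_eq (film : List (List Int)) (d w cr : Int) (hd : 0 < d)
    (hlen : d ≤ (film.length : Int)) :
    wlistB film d w cr PySem.Dict.empty 0 0 = wlistA film d w cr 0 := by
  unfold wlistA wlistB
  rw [List.filter_congr (fun cs hcs => bridge film d w cr hd hlen cs hcs)]
  apply List.map_congr_left
  intro cs _
  omega

-- ===== VERDICT (by name: the statement is the Claim_ definition above) =====
theorem min_projection_count_spec : Claim_equal_min_projection_count := by
  unfold Claim_equal_min_projection_count
  intro film d w cr _ hpre
  unfold Spec_min_projection_count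
  by_cases hw : w ≤ 0
  · -- no columns: both tests pass immediately, both return 0
    have hnilw : PySem.List.pyRange 0 w 1 = [] := PySem.List.pyRange_one_eq_nil (by omega)
    have ht : testA film d w cr = true := by unfold testA; rw [hnilw]; rfl
    have hok : okB film d w cr PySem.Dict.empty = true := by
      unfold okB; rw [hnilw]; rfl
    rw [min_projection_count, if_pos ht]
    unfold min_projection_count_alt
    rw [searchB, if_neg (by simp [pruneB]), if_pos hok]
  · by_cases hd : d ≤ 0
    · -- no rows: the test always fails, both searches are empty, both return depth
      have hw' : 0 < w := by omega
      have hnild : PySem.List.pyRange 1 d 1 = [] := PySem.List.pyRange_one_eq_nil (by omega)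
      have hnild0 : PySem.List.pyRange 0 d 1 = [] := PySem.List.pyRange_one_eq_nil (by omega)
      have h0w : (0 : Int) ∈ PySem.List.pyRange 0 w 1 :=
        PySem.List.mem_pyRange_one.mpr ⟨le_rfl, hw'⟩
      have ht : testA film d w cr = false := by
        unfold testA
        exact List.all_eq_false.mpr ⟨0, h0w, by rw [hnild]; simp [colLoopA]⟩
      have hok : okB film d w cr PySem.Dict.empty = false := by
        unfold okB
        refine List.all_eq_false.mpr ⟨0, h0w, ?_⟩
        unfold hasRunB colOfB
        rw [hnild0]
        simp [hasRunAux]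
      rw [min_projection_count, if_neg (by simp [ht])]
      rw [PySem.List.pyRange_one_eq_nil (by omega : d + 1 ≤ 1)]
      unfold min_projection_count_alt
      rw [searchB, if_neg (by simp [pruneB]), if_neg (by simp [hok]), dif_pos hd]
      rfl
    · -- main case: both sides compute the least repaint weight of a passing option
      have hd' : 0 < d := by omega
      have hlen : d ≤ (film.length : Int) := by
        rcases hpre with h | h | h
        · omega
        · omega
        · exact h.1
      rw [A_main film d w cr hd', B_main film d w cr, lists_eq film d w cr hd' hlen]
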